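-- pv_equiv track=rewrite | github.com/danielmarinhom/obi | obi/2024/fase2/turnoa/concatena.py | potencial
-- ===== SOURCE A (Python) =====
-- def potencial(st,en, lista):
--     nv = lista[st-1:en]
--     soma = 0
--     for i in range(len(nv)):
--         for j in range(1,len(nv)):
--             if j != i:
--                 x = str(nv[i])+str(nv[j])
--                 soma += int(x)
--             else:
--                 x = str(nv[i])+str(nv[j-i])
--                 soma += int(x)
--     return soma
-- ===== SOURCE B (Python) =====
-- def potencial(st, en, lista):
--     nv = lista[st-1:en]
--     reps = [str(v) for v in nv]
--     rest = reps[1:]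
--     total = sum(int(a + b) for a in reps for b in rest)
--     total -= sum(int(r + r) for r in rest)
--     total += sum(int(r + reps[0]) for r in rest)
--     return total
-- ===== Notes on version B (the rewrite author's own statement) =====
-- stated objective: alternative
-- what changed: A's branching nested index loops (with a per-pair 'if j != i' that redirects the diagonal to element 0) are replaced by three branch-free sums over once-cached string representations: a full cross sum plus inclusion-exclusion corrections (minus the diagonal, plus the first-element column).
import Mathlib
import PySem

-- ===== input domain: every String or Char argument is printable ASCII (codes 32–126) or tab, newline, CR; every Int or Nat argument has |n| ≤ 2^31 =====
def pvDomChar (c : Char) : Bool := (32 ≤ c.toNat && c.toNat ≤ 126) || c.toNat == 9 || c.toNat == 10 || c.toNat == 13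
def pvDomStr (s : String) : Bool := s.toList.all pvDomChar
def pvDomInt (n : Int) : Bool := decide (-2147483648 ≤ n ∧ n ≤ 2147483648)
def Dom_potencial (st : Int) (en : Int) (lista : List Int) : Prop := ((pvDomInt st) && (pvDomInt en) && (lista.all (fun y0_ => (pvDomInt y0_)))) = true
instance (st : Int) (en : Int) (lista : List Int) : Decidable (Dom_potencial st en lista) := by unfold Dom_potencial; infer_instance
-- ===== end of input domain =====

-- B replaces A's branching nested index loops by three branch-free sums over cached string
-- representations (full cross sum, minus a diagonal correction, plus a first-element correction);
-- objective: alternative.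

-- ===== PORT A =====
-- int(str(a)+str(b)) is ported exactly as PySem.Int.ofChars? (PySem.Int.toChars a ++ PySem.Int.toChars b);
-- the .getD 0 total form stands only where Python would raise ValueError — excluded by Pre_.
def potencial (st : Int) (en : Int) (lista : List Int) : Int :=
  let nv := PySem.List.slice lista (some (st - 1)) (some en)
  (PySem.List.pyRange 0 (PySem.List.len nv) 1).foldl (fun soma i =>
    (PySem.List.pyRange 1 (PySem.List.len nv) 1).foldl (fun soma j =>
      if j ≠ i then
        soma + (PySem.Int.ofChars? (PySem.Int.toChars (PySem.List.pyGetD nv i 0) ++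
                  PySem.Int.toChars (PySem.List.pyGetD nv j 0))).getD 0
      else
        soma + (PySem.Int.ofChars? (PySem.Int.toChars (PySem.List.pyGetD nv i 0) ++
                  PySem.Int.toChars (PySem.List.pyGetD nv (j - i) 0))).getD 0) soma) 0

-- ===== PORT B =====
def potencial_alt (st : Int) (en : Int) (lista : List Int) : Int :=
  let nv := PySem.List.slice lista (some (st - 1)) (some en)
  let reps := nv.map PySem.Int.toChars
  let rest := PySem.List.slice reps (some 1) none
  let total := (reps.map (fun a => (rest.map (fun b => (PySem.Int.ofChars? (a ++ b)).getD 0)).sum)).sum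
  let total := total - (rest.map (fun r => (PySem.Int.ofChars? (r ++ r)).getD 0)).sum
  let total := total + (rest.map (fun r => (PySem.Int.ofChars? (r ++ PySem.List.pyGetD reps 0 [])).getD 0)).sum
  total

-- ===== PRECONDITION & SPEC =====
-- A raises ValueError as soon as a negative element is the second half of a concatenation
-- ("…-…" is not an int literal); with a sliced window of ≥ 2 elements every element occurs there,
-- so Pre_ admits exactly the inputs on which the Python A returns normally.
def Pre_potencial (st : Int) (en : Int) (lista : List Int) : Prop :=
  (PySem.List.slice lista (some (st - 1)) (some en)).length < 2 ∨
    ∀ x ∈ PySem.List.slice lista (some (st - 1)) (some en), 0 ≤ x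
instance (st : Int) (en : Int) (lista : List Int) : Decidable (Pre_potencial st en lista) := by
  unfold Pre_potencial; infer_instance
def pvWitness_potencial : Int × Int × List Int := (1, 3, [12, 3, 4])
def Spec_potencial (st : Int) (en : Int) (lista : List Int) (out : Int) : Prop := out = potencial_alt st en lista
instance (st : Int) (en : Int) (lista : List Int) (out : Int) : Decidable (Spec_potencial st en lista out) := by unfold Spec_potencial; infer_instance

-- ===== CLAIM (what is proved, stated in full; the proofs are below) =====
def Claim_equal_potencial : Prop := ∀ (st : Int) (en : Int) (lista : List Int), Dom_potencial st en lista → Pre_potencial st en lista → Spec_potencial st en lista (potencial st en lista)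

-- ===== LEMMAS AND PROOFS =====

-- the concatenation primitive both programs apply to a pair of elements
def pvCat (a b : Int) : Int :=
  (PySem.Int.ofChars? (PySem.Int.toChars a ++ PySem.Int.toChars b)).getD 0

-- sum of a map whose value is exceptional at one point of a Nodup list
lemma pv_sum_map_ite_mem (l : List Int) (hnd : l.Nodup) (i : Int) (c : Int) (u : Int → Int) :
    (l.map (fun j => if j = i then c else u j)).sum
      = (l.map u).sum + (if i ∈ l then c - u i else 0) := by
  induction l with
  | nil => simp
  | cons a t ih =>
    rcases List.nodup_cons.mp hnd with ⟨ha, ht⟩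
    by_cases hai : a = i
    · subst hai
      simp [ha, ih ht]
      ring
    · simp [hai, ih ht, List.mem_cons, Ne.symm hai]
      split_ifs <;> ring

lemma pv_sum_map_sub (t : List Int) (u v : Int → Int) :
    (t.map (fun b => u b - v b)).sum = (t.map u).sum - (t.map v).sum := by
  induction t with
  | nil => simp
  | cons y s ih =>
    simp only [List.map_cons, List.sum_cons, ih]
    ring

-- A's double loop as a double sum plus a membership correction
lemma pvA_step (nv : List Int) :
    (PySem.List.pyRange 0 (PySem.List.len nv) 1).foldl (fun soma i =>
      (PySem.List.pyRange 1 (PySem.List.len nv) 1).foldl (fun soma j =>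
        if j ≠ i then
          soma + (PySem.Int.ofChars? (PySem.Int.toChars (PySem.List.pyGetD nv i 0) ++
                    PySem.Int.toChars (PySem.List.pyGetD nv j 0))).getD 0
        else
          soma + (PySem.Int.ofChars? (PySem.Int.toChars (PySem.List.pyGetD nv i 0) ++
                    PySem.Int.toChars (PySem.List.pyGetD nv (j - i) 0))).getD 0) soma) 0
    = ((PySem.List.pyRange 0 ((nv.length : Int)) 1).map (fun i =>
        ((PySem.List.pyRange 1 ((nv.length : Int)) 1).map
            (fun j => pvCat (PySem.List.pyGetD nv i 0) (PySem.List.pyGetD nv j 0))).sum)).sum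
      + ((PySem.List.pyRange 0 ((nv.length : Int)) 1).map (fun i =>
          if i ∈ PySem.List.pyRange 1 ((nv.length : Int)) 1 then
            pvCat (PySem.List.pyGetD nv i 0) (PySem.List.pyGetD nv 0 0)
              - pvCat (PySem.List.pyGetD nv i 0) (PySem.List.pyGetD nv i 0)
          else 0)).sum := by
  simp only [PySem.List.len_eq]
  rw [PySem.List.foldl_congr_mem _ _ (fun soma i => soma +
      ((PySem.List.pyRange 1 ((nv.length : Int)) 1).map
        (fun j => if j = i then pvCat (PySem.List.pyGetD nv i 0) (PySem.List.pyGetD nv 0 0)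
                  else pvCat (PySem.List.pyGetD nv i 0) (PySem.List.pyGetD nv j 0))).sum) 0 ?houter]
  · rw [PySem.List.foldl_add]
    rw [List.map_congr_left (g := fun i =>
        ((PySem.List.pyRange 1 ((nv.length : Int)) 1).map
            (fun j => pvCat (PySem.List.pyGetD nv i 0) (PySem.List.pyGetD nv j 0))).sum
        + (if i ∈ PySem.List.pyRange 1 ((nv.length : Int)) 1 then
            pvCat (PySem.List.pyGetD nv i 0) (PySem.List.pyGetD nv 0 0)
              - pvCat (PySem.List.pyGetD nv i 0) (PySem.List.pyGetD nv i 0)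
          else 0))
        (fun i _ => pv_sum_map_ite_mem _ (PySem.List.nodup_pyRange_one 1 _) i _ _)]
    rw [PySem.List.sum_map_add_int]
    ring
  case houter =>
    intro soma i _
    rw [PySem.List.foldl_congr_mem _ _ (fun s j => s +
        (if j = i then pvCat (PySem.List.pyGetD nv i 0) (PySem.List.pyGetD nv 0 0)
         else pvCat (PySem.List.pyGetD nv i 0) (PySem.List.pyGetD nv j 0))) soma ?hin]
    · rw [PySem.List.foldl_add]
    case hin =>
      intro acc j _
      by_cases h : j = i
      · subst h
        simp [pvCat]
      · simp [h, pvCat]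

-- A's value on the sliced window, as a closed sum formula
lemma pvA_formula (nv : List Int) :
    (PySem.List.pyRange 0 (PySem.List.len nv) 1).foldl (fun soma i =>
      (PySem.List.pyRange 1 (PySem.List.len nv) 1).foldl (fun soma j =>
        if j ≠ i then
          soma + (PySem.Int.ofChars? (PySem.Int.toChars (PySem.List.pyGetD nv i 0) ++
                    PySem.Int.toChars (PySem.List.pyGetD nv j 0))).getD 0
        else
          soma + (PySem.Int.ofChars? (PySem.Int.toChars (PySem.List.pyGetD nv i 0) ++
                    PySem.Int.toChars (PySem.List.pyGetD nv (j - i) 0))).getD 0) soma) 0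
    = (nv.map (fun a => (nv.tail.map (fun b => pvCat a b)).sum)).sum
      + ((nv.tail.map (fun b => pvCat b (nv.headD 0))).sum
         - (nv.tail.map (fun b => pvCat b b)).sum) := by
  rw [pvA_step]
  cases nv with
  | nil => simp [PySem.List.pyRange_one_eq_nil]
  | cons x t =>
    have hR1 : (PySem.List.pyRange 1 (((x :: t).length : Int)) 1).map
        (fun j => PySem.List.pyGetD (x :: t) j 0) = t := by
      have h := PySem.List.map_pyGetD_pyRange' (x :: t) 0 (a := 1) (by norm_num)
      simpa using h
    have hR0 : (PySem.List.pyRange 0 (((x :: t).length : Int)) 1).map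
        (fun j => PySem.List.pyGetD (x :: t) j 0) = x :: t :=
      PySem.List.map_pyGetD_pyRange_zero' (x :: t) 0
    have hcross : ∀ a : Int,
        ((PySem.List.pyRange 1 (((x :: t).length : Int)) 1).map
          (fun j => pvCat a (PySem.List.pyGetD (x :: t) j 0))).sum
        = (t.map (fun b => pvCat a b)).sum := by
      intro a
      rw [show (fun j => pvCat a (PySem.List.pyGetD (x :: t) j 0))
            = (fun b => pvCat a b) ∘ (fun j => PySem.List.pyGetD (x :: t) j 0) from rfl,
          ← List.map_map, hR1]
    rw [List.map_congr_left (l := PySem.List.pyRange 0 (((x :: t).length : Int)) 1)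
        (fun i _ => hcross (PySem.List.pyGetD (x :: t) i 0))]
    rw [show (fun i => (t.map (fun b => pvCat (PySem.List.pyGetD (x :: t) i 0) b)).sum)
          = (fun a => (t.map (fun b => pvCat a b)).sum) ∘ (fun j => PySem.List.pyGetD (x :: t) j 0) from rfl,
        ← List.map_map, hR0]
    have h0pos : (0:Int) < ((x :: t).length : Int) := by simp
    rw [PySem.List.pyRange_one_cons h0pos]
    simp only [zero_add, List.map_cons, List.sum_cons]
    have h0notin : (0:Int) ∉ PySem.List.pyRange 1 (((x :: t).length : Int)) 1 := by
      simp [PySem.List.mem_pyRange_one]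
    rw [if_neg h0notin]
    rw [List.map_congr_left (fun i hi => if_pos hi)]
    simp only [PySem.List.pyGetD_zero_cons]
    rw [show (fun i => pvCat (PySem.List.pyGetD (x :: t) i 0) x
            - pvCat (PySem.List.pyGetD (x :: t) i 0) (PySem.List.pyGetD (x :: t) i 0))
          = (fun a => pvCat a x - pvCat a a) ∘ (fun j => PySem.List.pyGetD (x :: t) j 0) from rfl,
        ← List.map_map, hR1]
    simp only [List.tail_cons, List.headD_cons]
    rw [pv_sum_map_sub t (fun a => pvCat a x) (fun a => pvCat a a)]
    ring

-- B's value on the sliced window, the same formula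
lemma pvB_formula (nv : List Int) :
    (let reps := nv.map PySem.Int.toChars
     let rest := PySem.List.slice reps (some 1) none
     let total := (reps.map (fun a => (rest.map (fun b => (PySem.Int.ofChars? (a ++ b)).getD 0)).sum)).sum
     let total := total - (rest.map (fun r => (PySem.Int.ofChars? (r ++ r)).getD 0)).sum
     let total := total + (rest.map (fun r => (PySem.Int.ofChars? (r ++ PySem.List.pyGetD reps 0 [])).getD 0)).sum
     total)
    = (nv.map (fun a => (nv.tail.map (fun b => pvCat a b)).sum)).sum
      + ((nv.tail.map (fun b => pvCat b (nv.headD 0))).sum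
         - (nv.tail.map (fun b => pvCat b b)).sum) := by
  cases nv with
  | nil => simp [PySem.List.slice_from_one]
  | cons x t =>
    simp only [PySem.List.slice_from_one, List.map_cons, List.tail_cons, List.headD_cons,
      PySem.List.pyGetD_zero_cons, List.map_map]
    simp only [Function.comp_def, pvCat]
    ring

-- ===== VERDICT (by name: the statement is the Claim_ definition above) =====
theorem potencial_spec : Claim_equal_potencial := by
  intro st en lista _ _
  unfold Spec_potencial potencial potencial_alt
  rw [pvA_formula, pvB_formula]
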